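-- pv_equiv track=rewrite | github.com/leeyenshen/agnesclaw | clawcampus/src/job_matcher.py | parse_jobmatch_sections
-- ===== SOURCE A (Python) =====
-- _HEADING_ALIASES = {
--     "resume": [
--         "here is my master resume/profile:",
--         "master resume/profile:",
--         "master resume:",
--         "resume:",
--     ],
--     "email": [
--         "here is the email to analyze:",
--         "email to analyze:",
--         "job alert email:",
--         "email:",
--     ],
--     "goals": [
--         "my goals and preferences:",
--         "goals and preferences:",
--         "preferences:",
--     ],
-- }
--
-- def parse_jobmatch_sections(text: str) -> dict[str, str] | None:
--     """Parse template sections from a user message."""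
--     if not text or not text.strip():
--         return None
--
--     lowered = text.lower()
--
--     def find_first(aliases: list[str]) -> tuple[int, str] | None:
--         hits = []
--         for alias in aliases:
--             idx = lowered.find(alias)
--             if idx != -1:
--                 hits.append((idx, alias))
--         if not hits:
--             return None
--         return min(hits, key=lambda item: item[0])
--
--     positions: list[tuple[int, str, str]] = []
--     for section_name, aliases in _HEADING_ALIASES.items():
--         found = find_first(aliases)
--         if found:
--             positions.append((found[0], section_name, found[1]))
--
--     if not positions:
--         return None
--     positions.sort(key=lambda item: item[0])
--
--     extracted = {"master_resume": "", "email_text": "", "goals_preferences": ""}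
--     for i, (start_idx, section_name, heading_text) in enumerate(positions):
--         content_start = start_idx + len(heading_text)
--         content_end = positions[i + 1][0] if i + 1 < len(positions) else len(text)
--         content = text[content_start:content_end].strip()
--         if section_name == "resume":
--             extracted["master_resume"] = content
--         elif section_name == "email":
--             extracted["email_text"] = content
--         elif section_name == "goals":
--             extracted["goals_preferences"] = content
--
--     if not extracted["email_text"]:
--         return None
--     return extracted
-- ===== SOURCE B (Python) =====
-- _SECTION_HEADINGS = {
--     "master_resume": [
--         "here is my master resume/profile:",
--         "master resume/profile:",
--         "master resume:",
--         "resume:",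
--     ],
--     "email_text": [
--         "here is the email to analyze:",
--         "email to analyze:",
--         "job alert email:",
--         "email:",
--     ],
--     "goals_preferences": [
--         "my goals and preferences:",
--         "goals and preferences:",
--         "preferences:",
--     ],
-- }
--
--
-- def _first_heading(lowered, aliases):
--     """Earliest position where one of the aliases occurs (most specific alias first)."""
--     for pos in range(len(lowered)):
--         for alias in aliases:
--             if lowered.startswith(alias, pos):
--                 return pos, alias
--     return None
--
--
-- def parse_jobmatch_sections(text: str):
--     """Parse template sections from a user message."""
--     if not text or not text.strip():
--         return None
--
--     lowered = text.lower()
--     hits = {}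
--     for key, aliases in _SECTION_HEADINGS.items():
--         hit = _first_heading(lowered, aliases)
--         if hit:
--             hits[key] = hit
--
--     if not hits:
--         return None
--
--     out = {"master_resume": "", "email_text": "", "goals_preferences": ""}
--     for key, (pos, alias) in hits.items():
--         end = min((p for p, _ in hits.values() if p > pos), default=len(text))
--         out[key] = text[pos + len(alias):end].strip()
--
--     if not out["email_text"]:
--         return None
--     return out
-- ===== Notes on version B (the rewrite author's own statement) =====
-- stated objective: alternative
-- what changed: A runs str.find once per alias, collects (index, alias) hits, takes the min per section, then stable-sorts the found sections and pairs each with its successor; B instead makes one left-to-right scan per section that stops at the first position where an alias starts, keeps the hits in a dict, and computes each section's content boundary directly as the minimum heading position strictly after it (no sort, no hit list).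
import Mathlib
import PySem

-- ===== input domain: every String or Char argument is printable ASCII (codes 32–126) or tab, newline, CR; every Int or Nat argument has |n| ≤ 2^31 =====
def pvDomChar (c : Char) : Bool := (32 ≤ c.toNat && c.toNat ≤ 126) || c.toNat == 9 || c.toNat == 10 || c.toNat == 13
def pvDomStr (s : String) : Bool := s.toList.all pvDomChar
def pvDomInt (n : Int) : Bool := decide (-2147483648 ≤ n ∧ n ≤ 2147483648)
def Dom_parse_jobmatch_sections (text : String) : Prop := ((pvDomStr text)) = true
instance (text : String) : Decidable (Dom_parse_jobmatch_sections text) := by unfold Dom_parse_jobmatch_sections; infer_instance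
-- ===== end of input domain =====

-- B replaces A's per-alias str.find + min + stable sort with one left-to-right scan per section
-- (first position where an alias starts) and a direct min-of-later-positions boundary; objective: alternative.

-- ===== PORT A =====
def aSections : List (String × List String) :=
  [("resume", ["here is my master resume/profile:", "master resume/profile:", "master resume:", "resume:"]),
   ("email", ["here is the email to analyze:", "email to analyze:", "job alert email:", "email:"]),
   ("goals", ["my goals and preferences:", "goals and preferences:", "preferences:"])]

def a_find_first (lowered : String) (aliases : List String) : Option (Int × String) :=
  let hits := aliases.foldl (fun h al =>
    let idx := PySem.Str.find lowered al
    if idx ≠ -1 then h ++ [(idx, al)] else h) ([] : List (Int × String))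
  PySem.List.min? hits (fun p => p.1)

-- the body of A's extraction loop (one iteration over the enumerated sorted positions)
def a_assign (text : String) (positions : List (Int × String × String))
    (d : PySem.Dict String String) (it : Int × Int × String × String) : PySem.Dict String String :=
  let content_start := it.2.1 + PySem.Str.len it.2.2.2
  let content_end := if it.1 + 1 < (positions.length : Int)
    then (PySem.List.pyGetD positions (it.1 + 1) (0, "", "")).1
    else PySem.Str.len text
  let content := PySem.Str.strip (PySem.Str.slice text (some content_start) (some content_end))
  if it.2.2.1 == "resume" then d.insert "master_resume" content
  else if it.2.2.1 == "email" then d.insert "email_text" content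
  else if it.2.2.1 == "goals" then d.insert "goals_preferences" content
  else d

def parse_jobmatch_sections (text : String) : Option (List (String × String)) :=
  if PySem.Str.len text == 0 || PySem.Str.len (PySem.Str.strip text) == 0 then none
  else
    let lowered := PySem.Str.lower text
    let positions := aSections.foldl (fun ps sec =>
      match a_find_first lowered sec.2 with
      | some (idx, al) => ps ++ [(idx, sec.1, al)]
      | none => ps) ([] : List (Int × String × String))
    if positions == [] then none
    else
      let positions := PySem.List.sorted positions (fun t => t.1) false
      let extracted : PySem.Dict String String :=
        PySem.Dict.ofList [("master_resume", ""), ("email_text", ""), ("goals_preferences", "")]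
      let extracted := (PySem.List.enumerate positions).foldl (a_assign text positions) extracted
      if extracted.getD "email_text" "" == "" then none else some extracted.items

-- ===== PORT B =====
def bTable : List (String × List String) :=
  [("master_resume", ["here is my master resume/profile:", "master resume/profile:", "master resume:", "resume:"]),
   ("email_text", ["here is the email to analyze:", "email to analyze:", "job alert email:", "email:"]),
   ("goals_preferences", ["my goals and preferences:", "goals and preferences:", "preferences:"])]

-- Source B's _first_heading; 'lowered.startswith(alias, pos)' is ported by hand as the prefix
-- test on the slice at pos — exact for the non-negative in-range pos produced by range()
def b_first_heading (lowered : String) (aliases : List String) : Option (Int × String) :=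
  (PySem.List.pyRange 0 (PySem.Str.len lowered) 1).findSome? (fun pos =>
    aliases.findSome? (fun al =>
      if PySem.Str.slice lowered (some pos) (some (pos + PySem.Str.len al)) == al
      then some (pos, al) else none))

-- the hits dict: section key ↦ (position, alias) for each section that occurs
def b_hits (lowered : String) : PySem.Dict String (Int × String) :=
  bTable.foldl (fun d sec =>
    match b_first_heading lowered sec.2 with
    | some h => d.insert sec.1 h
    | none => d) (PySem.Dict.mk [])

-- min((p for p in positions if p > pos), default=len(text))
def b_end (text : String) (positions : List Int) (pos : Int) : Int :=
  PySem.List.minD (positions.filter (fun p => decide (pos < p))) (fun p => p) (PySem.Str.len text)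

def parse_jobmatch_sections_alt (text : String) : Option (List (String × String)) :=
  if PySem.Str.len text == 0 || PySem.Str.len (PySem.Str.strip text) == 0 then none
  else
    let lowered := PySem.Str.lower text
    let hits := b_hits lowered
    if hits.items == [] then none
    else
      let out : PySem.Dict String String :=
        PySem.Dict.ofList [("master_resume", ""), ("email_text", ""), ("goals_preferences", "")]
      let out := hits.items.foldl (fun d kv =>
        d.insert kv.1 (PySem.Str.strip (PySem.Str.slice text (some (kv.2.1 + PySem.Str.len kv.2.2))
          (some (b_end text (hits.items.map (fun x => x.2.1)) kv.2.1))))) out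
      if out.getD "email_text" "" == "" then none else some out.items

-- ===== PRECONDITION & SPEC =====
def Spec_parse_jobmatch_sections (text : String) (out : Option (List (String × String))) : Prop := out = parse_jobmatch_sections_alt text
instance (text : String) (out : Option (List (String × String))) : Decidable (Spec_parse_jobmatch_sections text out) := by unfold Spec_parse_jobmatch_sections; infer_instance

-- ===== CLAIM (what is proved, stated in full; the proofs are below) =====
def Claim_equal_parse_jobmatch_sections : Prop := ∀ (text : String), Dom_parse_jobmatch_sections text → Spec_parse_jobmatch_sections text (parse_jobmatch_sections text)

-- ===== LEMMAS AND PROOFS =====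

-- generic small helpers

lemma pv_findSome?_ite {α β : Type} (p : α → Prop) [DecidablePred p] (f : α → β) (l : List α) :
    l.findSome? (fun a => if p a then some (f a) else none)
      = (l.find? (fun a => decide (p a))).map f := by
  induction l with
  | nil => rfl
  | cons x t ih =>
    by_cases hx : p x
    · simp [List.findSome?_cons, List.find?_cons, hx]
    · simp [List.findSome?_cons, List.find?_cons, hx, ih]

lemma pv_findSome?_range_first {β : Type} (n i0 : Nat) (F : Nat → Option β) (v : β)
    (hi : i0 < n) (hnone : ∀ j, j < i0 → F j = none) (hv : F i0 = some v) :
    (List.range n).findSome? F = some v := by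
  have hsplit : List.range n = List.range i0 ++ List.range' i0 (n - i0) := by
    rw [List.range_eq_range', List.range_eq_range']
    have := List.range'_append (s := 0) (m := i0) (n := n - i0) (step := 1)
    simp at this
    rw [this]
    congr 1
    omega
  rw [hsplit, List.findSome?_append]
  have h1 : (List.range i0).findSome? F = none := by
    rw [List.findSome?_eq_none_iff]
    intro j hj
    exact hnone j (List.mem_range.mp hj)
  rw [h1]
  have h2 : List.range' i0 (n - i0) = i0 :: List.range' (i0+1) (n - i0 - 1) := by
    cases hk : n - i0 with
    | zero => omega
    | succ m => rw [List.range'_succ]; simp [hk]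
  rw [h2]
  simp [List.findSome?_cons, hv]

lemma pv_foldl_min_stay {α : Type} (key : α → Int) (l : List α) (m : α)
    (h : ∀ x ∈ l, key m ≤ key x) :
    l.foldl (fun acc x =>
      match acc with
      | none => some x
      | some mm => if key x < key mm then some x else some mm) (some m) = some m := by
  induction l with
  | nil => rfl
  | cons x t ih =>
    have hx : ¬ key x < key m := not_lt.mpr (h x (by simp))
    simp only [List.foldl_cons, hx, if_false]
    exact ih (fun y hy => h y (by simp [hy]))

lemma pv_min?_first {α : Type} (key : α → Int) (l₁ l₂ : List α) (m : α)
    (h1 : ∀ x ∈ l₁, key m < key x) (h2 : ∀ x ∈ l₂, key m ≤ key x) :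
    PySem.List.min? (l₁ ++ m :: l₂) key = some m := by
  unfold PySem.List.min?
  rw [List.foldl_append]
  rcases hm1 : PySem.List.min? l₁ key with _ | m₁
  · rw [PySem.List.min?] at hm1
    rw [hm1]
    exact pv_foldl_min_stay key l₂ m h2
  · have hmem : m₁ ∈ l₁ := PySem.List.min?_mem hm1
    rw [PySem.List.min?] at hm1
    rw [hm1]
    simp only [List.foldl_cons, h1 m₁ hmem, if_true]
    exact pv_foldl_min_stay key l₂ m h2

-- hits fold as filter+map
lemma pv_hits_eq (lowered : String) (as : List String) (acc : List (Int × String)) :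
    as.foldl (fun h al =>
      let idx := PySem.Str.find lowered al
      if idx ≠ -1 then h ++ [(idx, al)] else h) acc
    = acc ++ (as.filter (fun al => !(PySem.Str.find lowered al == -1))).map
        (fun al => (PySem.Str.find lowered al, al)) := by
  induction as generalizing acc with
  | nil => simp
  | cons x t ih =>
    by_cases hx : PySem.Str.find lowered x = -1
    · simp only [List.foldl_cons, hx]
      rw [ih]
      have hx' : (!(PySem.Str.find lowered x == -1)) = false := by simp only [hx]; decide
      rw [List.filter_cons, hx']
      rw [PySem.Str.find_eq] at hx
      simp [hx]
    · simp only [List.foldl_cons, hx]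
      rw [ih]
      have hx' : (!(PySem.Str.find lowered x == -1)) = true := by simpa using hx
      rw [List.filter_cons, hx']
      rw [PySem.Str.find_eq] at hx
      simp [hx]

lemma pv_find_spec (s sub : List Char) (h : PySem.Chars.find s sub ≠ -1) :
    0 ≤ PySem.Chars.find s sub ∧ sub <+: s.drop (PySem.Chars.find s sub).toNat ∧
      ∀ i : Nat, i < (PySem.Chars.find s sub).toNat → ¬ sub <+: s.drop i := by
  have h0 : (0:Nat) ≤ s.length := Nat.zero_le _
  have := PySem.Chars.findFrom_natCast_spec s sub 0 h0
  rw [Nat.cast_zero, PySem.Chars.findFrom_zero] at this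
  obtain ⟨ha, hb, hc⟩ := this h
  exact ⟨ha, hb, fun i hi => hc i (Nat.zero_le _) hi⟩

lemma pv_pref_infix (s sub : List Char) (j : Nat) (h : sub <+: s.drop j) : sub <:+: s :=
  List.infix_iff_prefix_suffix.mpr ⟨s.drop j, h, List.drop_suffix _ _⟩

lemma pv_ofList_eq_iff (l : List Char) (t : String) : String.ofList l = t ↔ l = t.toList := by
  constructor
  · intro h; rw [← h, String.toList_ofList]
  · intro h; rw [h]; exact String.ofList_toList

-- B side normal form
lemma pv_b_first_heading_eq (lowered : String) (as : List String) :
    b_first_heading lowered as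
      = (List.range lowered.toList.length).findSome? (fun k =>
          (as.find? (fun al => decide (al.toList <+: lowered.toList.drop k))).map
            (fun al => ((k : Int), al))) := by
  unfold b_first_heading
  rw [PySem.Str.len_eq, PySem.List.pyRange_zero_nat, List.findSome?_map]
  have hfun : ((fun i => as.findSome? (fun al =>
        if (PySem.Str.slice lowered (some i) (some (i + PySem.Str.len al)) == al) = true
        then some (i, al) else none)) ∘ (fun k : Nat => (k : Int)))
      = (fun k : Nat =>
          (as.find? (fun al => decide (al.toList <+: lowered.toList.drop k))).map
            (fun al => ((k : Int), al))) := by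
    funext k
    simp only [Function.comp_apply]
    have hcond : ∀ al : String,
        ((PySem.Str.slice lowered (some (k:Int)) (some ((k:Int) + PySem.Str.len al)) == al) = true)
          = (al.toList <+: lowered.toList.drop k) := by
      intro al
      have hsl : PySem.Str.slice lowered (some (k:Int)) (some ((k:Int) + PySem.Str.len al))
          = String.ofList ((lowered.toList.drop k).take al.toList.length) := by
        rw [PySem.Str.len_eq]
        unfold PySem.Str.slice PySem.Chars.slice
        rw [PySem.List.slice_natCast_add]
      rw [hsl, eq_iff_iff, beq_iff_eq, pv_ofList_eq_iff]
      constructor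
      · intro h; exact List.prefix_iff_eq_take.mpr h.symm
      · intro h; exact (List.prefix_iff_eq_take.mp h).symm
    simp only [hcond]
    exact pv_findSome?_ite (fun al => al.toList <+: lowered.toList.drop k)
      (fun al => ((k : Int), al)) as
  rw [hfun]

-- a hit names an alias of its section occurring at that position
lemma pv_hit_mem_prefix (lowered : String) (as : List String) (i : Int) (a : String)
    (h : b_first_heading lowered as = some (i, a)) :
    a ∈ as ∧ ∃ k : Nat, i = (k : Int) ∧ a.toList <+: lowered.toList.drop k := by
  rw [pv_b_first_heading_eq] at h
  obtain ⟨k, hk, hfk⟩ := List.exists_of_findSome?_eq_some h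
  rcases hf : as.find? (fun al => decide (al.toList <+: lowered.toList.drop k)) with _ | al
  · rw [hf] at hfk; simp at hfk
  · rw [hf] at hfk
    simp only [Option.map_some] at hfk
    have heq : ((k:Int), al) = (i, a) := Option.some.inj hfk
    obtain ⟨hik, hala⟩ := Prod.mk.injEq .. ▸ heq
    subst hala
    refine ⟨List.mem_of_find?_eq_some hf, k, hik.symm, ?_⟩
    have := List.find?_some hf
    exact of_decide_eq_true this

-- two sections whose alias sets are mutually prefix-free never start at the same position
lemma pv_hits_ne (lowered : String) (as1 as2 : List String) (i1 i2 : Int) (a1 a2 : String)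
    (h1 : b_first_heading lowered as1 = some (i1, a1))
    (h2 : b_first_heading lowered as2 = some (i2, a2))
    (hd : ∀ x ∈ as1, ∀ y ∈ as2, ¬ x.toList <+: y.toList ∧ ¬ y.toList <+: x.toList) :
    i1 ≠ i2 := by
  obtain ⟨hm1, k1, hk1, hp1⟩ := pv_hit_mem_prefix _ _ _ _ h1
  obtain ⟨hm2, k2, hk2, hp2⟩ := pv_hit_mem_prefix _ _ _ _ h2
  intro he
  have hkk : k1 = k2 := by omega
  subst hkk
  rcases List.prefix_or_prefix_of_prefix hp1 hp2 with h | h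
  · exact (hd a1 hm1 a2 hm2).1 h
  · exact (hd a1 hm1 a2 hm2).2 h

lemma pv_disj_re : ∀ x ∈ (["here is my master resume/profile:", "master resume/profile:", "master resume:", "resume:"] : List String), ∀ y ∈ (["here is the email to analyze:", "email to analyze:", "job alert email:", "email:"] : List String), ¬ x.toList <+: y.toList ∧ ¬ y.toList <+: x.toList := by decide

lemma pv_disj_rg : ∀ x ∈ (["here is my master resume/profile:", "master resume/profile:", "master resume:", "resume:"] : List String), ∀ y ∈ (["my goals and preferences:", "goals and preferences:", "preferences:"] : List String), ¬ x.toList <+: y.toList ∧ ¬ y.toList <+: x.toList := by decide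

lemma pv_disj_eg : ∀ x ∈ (["here is the email to analyze:", "email to analyze:", "job alert email:", "email:"] : List String), ∀ y ∈ (["my goals and preferences:", "goals and preferences:", "preferences:"] : List String), ¬ x.toList <+: y.toList ∧ ¬ y.toList <+: x.toList := by decide

-- b_end evaluation
lemma pv_bend_len (text : String) (l : List Int) (pos : Int) (h : ∀ p ∈ l, ¬ pos < p) :
    b_end text l pos = PySem.Str.len text := by
  have hf : l.filter (fun p => decide (pos < p)) = [] := by
    rw [List.filter_eq_nil_iff]; intro p hp; simpa using h p hp
  unfold b_end
  rw [hf]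
  rfl

lemma pv_bend_eq (text : String) (l : List Int) (pos m : Int) (hm : m ∈ l) (hpm : pos < m)
    (hmin : ∀ p ∈ l, pos < p → m ≤ p) : b_end text l pos = m := by
  have hmf : m ∈ l.filter (fun p => decide (pos < p)) :=
    List.mem_filter.mpr ⟨hm, by simpa using hpm⟩
  unfold b_end PySem.List.minD
  rcases h : PySem.List.min? (l.filter (fun p => decide (pos < p))) (fun p => p) with _ | x
  · rw [PySem.List.min?_eq_none_iff] at h
    rw [h] at hmf
    simp at hmf
  · have hx := PySem.List.min?_mem h
    have hxle := PySem.List.min?_isMin h m hmf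
    obtain ⟨hxl, hxp⟩ := List.mem_filter.mp hx
    have hmx : m ≤ x := hmin x hxl (by simpa using hxp)
    simp only [Option.getD_some]
    simp only at hxle
    omega

-- equality of the two first-occurrence searches
lemma find_first_eq (lowered : String) (as : List String) (hne : ∀ a ∈ as, a.toList ≠ []) :
    a_find_first lowered as = b_first_heading lowered as := by
  rw [pv_b_first_heading_eq]
  show PySem.List.min?
      (as.foldl (fun h al =>
        let idx := PySem.Str.find lowered al
        if idx ≠ -1 then h ++ [(idx, al)] else h) []) (fun p => p.1) = _
  rw [pv_hits_eq lowered as [], List.nil_append]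
  simp only [PySem.Str.find_eq]
  by_cases hocc : ∀ al ∈ as, ¬ (al.toList <:+: lowered.toList)
  · have hfil : (as.filter (fun al => !(PySem.Chars.find lowered.toList al.toList == -1))) = [] := by
      rw [List.filter_eq_nil_iff]
      intro al hal
      have : PySem.Chars.find lowered.toList al.toList = -1 :=
        (PySem.Chars.find_eq_neg_one_iff _ _).mpr (hocc al hal)
      simp [this]
    rw [hfil]
    have hB : (List.range lowered.toList.length).findSome? (fun k =>
        (as.find? (fun al => decide (al.toList <+: lowered.toList.drop k))).map
          (fun al => ((k : Int), al))) = none := by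
      rw [List.findSome?_eq_none_iff]
      intro k _
      rw [Option.map_eq_none_iff, List.find?_eq_none]
      intro al hal hpref
      exact hocc al hal (pv_pref_infix _ _ k (of_decide_eq_true hpref))
    rw [hB]
    rfl
  · push_neg at hocc
    obtain ⟨al₀, hal₀, hinf₀⟩ := hocc
    set Q : String → Bool := fun al => !(PySem.Chars.find lowered.toList al.toList == -1) with hQ
    set occs := as.filter Q with hoccs
    have hoccs_ne : occs ≠ [] := by
      have : al₀ ∈ occs := by
        rw [hoccs, List.mem_filter]
        refine ⟨hal₀, ?_⟩
        have : PySem.Chars.find lowered.toList al₀.toList ≠ -1 :=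
          (PySem.Chars.find_ne_neg_one_iff _ _).mpr hinf₀
        simp [hQ, this]
      exact List.ne_nil_of_mem this
    set vals := occs.map (fun al => (PySem.Chars.find lowered.toList al.toList).toNat) with hvals
    have hvals_ne : vals ≠ [] := by simp [hvals, hoccs_ne]
    obtain ⟨i0, hmin, hi0mem, hi0le⟩ : ∃ m, vals.min? = some m ∧ m ∈ vals ∧ ∀ b ∈ vals, m ≤ b := by
      rcases hm : vals.min? with _ | m
      · rw [List.min?_eq_none_iff] at hm; exact absurd hm hvals_ne
      · exact ⟨m, rfl, (List.min?_eq_some_iff).mp hm⟩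
    have hocc_fact : ∀ al ∈ as, Q al = true →
        PySem.Chars.find lowered.toList al.toList ≠ -1 ∧
        (i0 : Int) ≤ PySem.Chars.find lowered.toList al.toList := by
      intro al hal hq
      have hne1 : PySem.Chars.find lowered.toList al.toList ≠ -1 := by
        by_contra hcc
        simp [hQ, hcc] at hq
      have hmem : (PySem.Chars.find lowered.toList al.toList).toNat ∈ vals := by
        rw [hvals]
        exact List.mem_map_of_mem (by rw [hoccs, List.mem_filter]; exact ⟨hal, hq⟩)
      have h0 : 0 ≤ PySem.Chars.find lowered.toList al.toList := (pv_find_spec _ _ hne1).1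
      have := hi0le _ hmem
      omega
    obtain ⟨b0, hb0occ, hb0val⟩ : ∃ b ∈ occs, (PySem.Chars.find lowered.toList b.toList).toNat = i0 := by
      rw [hvals] at hi0mem
      obtain ⟨b, hb, hbv⟩ := List.mem_map.mp hi0mem
      exact ⟨b, hb, hbv⟩
    have hb0as : b0 ∈ as := (List.mem_filter.mp (hoccs ▸ hb0occ)).1
    have hb0q : Q b0 = true := (List.mem_filter.mp (hoccs ▸ hb0occ)).2
    have hb0find : PySem.Chars.find lowered.toList b0.toList = (i0 : Int) := by
      have := (hocc_fact b0 hb0as hb0q).1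
      have h0 : 0 ≤ PySem.Chars.find lowered.toList b0.toList := (pv_find_spec _ _ this).1
      omega
    have hfind_isSome : (as.find? (fun al => PySem.Chars.find lowered.toList al.toList == (i0:Int))).isSome := by
      rw [List.find?_isSome]
      exact ⟨b0, hb0as, by simp [hb0find]⟩
    obtain ⟨a0, ha0⟩ := Option.isSome_iff_exists.mp hfind_isSome
    obtain ⟨ha0p, u, v, huv, hu⟩ := List.find?_eq_some_iff_append.mp ha0
    have ha0find : PySem.Chars.find lowered.toList a0.toList = (i0 : Int) := by simpa using ha0p
    have ha0as : a0 ∈ as := by rw [huv]; exact List.mem_append_right _ (List.mem_cons_self)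
    have ha0ne : PySem.Chars.find lowered.toList a0.toList ≠ -1 := by
      rw [ha0find]; omega
    obtain ⟨_, ha0pref, ha0min⟩ := pv_find_spec _ _ ha0ne
    rw [ha0find] at ha0pref ha0min
    simp only [Int.toNat_natCast] at ha0pref ha0min
    have hu' : ∀ x ∈ u, PySem.Chars.find lowered.toList x.toList ≠ (i0 : Int) := by
      intro x hx
      have := hu x hx
      simpa using this
    have hAside : PySem.List.min?
        ((as.filter Q).map (fun al => (PySem.Chars.find lowered.toList al.toList, al)))
        (fun p => p.1) = some ((i0:Int), a0) := by
      have hfq : as.filter Q = (u.filter Q) ++ a0 :: (v.filter Q) := by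
        rw [huv, List.filter_append, List.filter_cons]
        have : Q a0 = true := by simp [hQ, ha0ne]
        rw [this]
        simp
      rw [hfq, List.map_append, List.map_cons]
      have : ((PySem.Chars.find lowered.toList a0.toList, a0) : Int × String) = ((i0:Int), a0) := by
        rw [ha0find]
      rw [this]
      apply pv_min?_first
      · intro x hx
        obtain ⟨y, hy, hyx⟩ := List.mem_map.mp hx
        have hyu : y ∈ u := (List.mem_filter.mp hy).1
        have hyq : Q y = true := (List.mem_filter.mp hy).2
        have hyas : y ∈ as := by rw [huv]; exact List.mem_append_left _ hyu
        have := (hocc_fact y hyas hyq).2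
        have hne0 := hu' y hyu
        rw [← hyx]
        simp only
        omega
      · intro x hx
        obtain ⟨y, hy, hyx⟩ := List.mem_map.mp hx
        have hyq : Q y = true := (List.mem_filter.mp hy).2
        have hyas : y ∈ as := by
          rw [huv]
          exact List.mem_append_right _ (List.mem_cons_of_mem _ (List.mem_filter.mp hy).1)
        have := (hocc_fact y hyas hyq).2
        rw [← hyx]
        simp only
        omega
    rw [hAside]
    have hi0lt : i0 < lowered.toList.length := by
      have hd : lowered.toList.drop i0 ≠ [] := by
        intro hnil
        rw [hnil, List.prefix_nil] at ha0pref
        exact hne a0 ha0as ha0pref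
      rw [ne_eq, List.drop_eq_nil_iff] at hd
      omega
    rw [pv_findSome?_range_first lowered.toList.length i0 _ ((i0:Int), a0) hi0lt ?_ ?_]
    · intro j hj
      rw [Option.map_eq_none_iff, List.find?_eq_none]
      intro al hal hpref
      replace hpref := of_decide_eq_true hpref
      have hne1 : PySem.Chars.find lowered.toList al.toList ≠ -1 :=
        (PySem.Chars.find_ne_neg_one_iff _ _).mpr (pv_pref_infix _ _ j hpref)
      have hq : Q al = true := by simp [hQ, hne1]
      have hge := (hocc_fact al hal hq).2
      obtain ⟨h0, _, hmin⟩ := pv_find_spec _ _ hne1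
      have := hmin j
      by_cases hlt : j < (PySem.Chars.find lowered.toList al.toList).toNat
      · exact (this hlt) hpref
      · omega
    · have : as.find? (fun al => decide (al.toList <+: lowered.toList.drop i0)) = some a0 := by
        rw [huv, List.find?_append]
        have hu0 : u.find? (fun al => decide (al.toList <+: lowered.toList.drop i0)) = none := by
          rw [List.find?_eq_none]
          intro x hx hpref
          replace hpref := of_decide_eq_true hpref
          have hne1 : PySem.Chars.find lowered.toList x.toList ≠ -1 :=
            (PySem.Chars.find_ne_neg_one_iff _ _).mpr (pv_pref_infix _ _ i0 hpref)
          have hxas : x ∈ as := by rw [huv]; exact List.mem_append_left _ hx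
          have hq : Q x = true := by simp [hQ, hne1]
          have hge := (hocc_fact x hxas hq).2
          obtain ⟨h0, _, hmin⟩ := pv_find_spec _ _ hne1
          have hle : (PySem.Chars.find lowered.toList x.toList).toNat ≤ i0 := by
            by_contra hgt
            exact (hmin i0 (by omega)) hpref
          have : PySem.Chars.find lowered.toList x.toList = (i0:Int) := by omega
          exact (hu' x hx) this
        rw [hu0]
        simp only [Option.none_or, List.find?_cons]
        have : decide (a0.toList <+: lowered.toList.drop i0) = true := decide_eq_true ha0pref
        rw [this]
      rw [this]
      rfl

-- A-side extraction-loop evaluations (one per present-section pattern / sorted order)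
lemma pvA_e (text : String) (pe : Int) (ae : String) :
    (PySem.List.enumerate [(pe, "email", ae)]).foldl (a_assign text [(pe, "email", ae)])
      (PySem.Dict.ofList [("master_resume", ""), ("email_text", ""), ("goals_preferences", "")])
    = PySem.Dict.mk [("master_resume", ""), ("email_text", PySem.Str.strip (PySem.Str.slice text (some (pe + PySem.Str.len ae)) (some (PySem.Str.len text)))), ("goals_preferences", "")] := rfl

lemma pvA_r (text : String) (pr : Int) (ar : String) :
    (PySem.List.enumerate [(pr, "resume", ar)]).foldl (a_assign text [(pr, "resume", ar)])
      (PySem.Dict.ofList [("master_resume", ""), ("email_text", ""), ("goals_preferences", "")])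
    = PySem.Dict.mk [("master_resume", PySem.Str.strip (PySem.Str.slice text (some (pr + PySem.Str.len ar)) (some (PySem.Str.len text)))), ("email_text", ""), ("goals_preferences", "")] := rfl

lemma pvA_g (text : String) (pg : Int) (ag : String) :
    (PySem.List.enumerate [(pg, "goals", ag)]).foldl (a_assign text [(pg, "goals", ag)])
      (PySem.Dict.ofList [("master_resume", ""), ("email_text", ""), ("goals_preferences", "")])
    = PySem.Dict.mk [("master_resume", ""), ("email_text", ""), ("goals_preferences", PySem.Str.strip (PySem.Str.slice text (some (pg + PySem.Str.len ag)) (some (PySem.Str.len text))))] := rfl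

lemma pvA_rg (text : String) (pr : Int) (ar : String) (pg : Int) (ag : String) :
    (PySem.List.enumerate [(pr, "resume", ar), (pg, "goals", ag)]).foldl (a_assign text [(pr, "resume", ar), (pg, "goals", ag)])
      (PySem.Dict.ofList [("master_resume", ""), ("email_text", ""), ("goals_preferences", "")])
    = PySem.Dict.mk [("master_resume", PySem.Str.strip (PySem.Str.slice text (some (pr + PySem.Str.len ar)) (some (pg)))), ("email_text", ""), ("goals_preferences", PySem.Str.strip (PySem.Str.slice text (some (pg + PySem.Str.len ag)) (some (PySem.Str.len text))))] := rfl

lemma pvA_gr (text : String) (pg : Int) (ag : String) (pr : Int) (ar : String) :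
    (PySem.List.enumerate [(pg, "goals", ag), (pr, "resume", ar)]).foldl (a_assign text [(pg, "goals", ag), (pr, "resume", ar)])
      (PySem.Dict.ofList [("master_resume", ""), ("email_text", ""), ("goals_preferences", "")])
    = PySem.Dict.mk [("master_resume", PySem.Str.strip (PySem.Str.slice text (some (pr + PySem.Str.len ar)) (some (PySem.Str.len text)))), ("email_text", ""), ("goals_preferences", PySem.Str.strip (PySem.Str.slice text (some (pg + PySem.Str.len ag)) (some (pr))))] := rfl

lemma pvA_re (text : String) (pr : Int) (ar : String) (pe : Int) (ae : String) :
    (PySem.List.enumerate [(pr, "resume", ar), (pe, "email", ae)]).foldl (a_assign text [(pr, "resume", ar), (pe, "email", ae)])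
      (PySem.Dict.ofList [("master_resume", ""), ("email_text", ""), ("goals_preferences", "")])
    = PySem.Dict.mk [("master_resume", PySem.Str.strip (PySem.Str.slice text (some (pr + PySem.Str.len ar)) (some (pe)))), ("email_text", PySem.Str.strip (PySem.Str.slice text (some (pe + PySem.Str.len ae)) (some (PySem.Str.len text)))), ("goals_preferences", "")] := rfl

lemma pvA_er (text : String) (pe : Int) (ae : String) (pr : Int) (ar : String) :
    (PySem.List.enumerate [(pe, "email", ae), (pr, "resume", ar)]).foldl (a_assign text [(pe, "email", ae), (pr, "resume", ar)])
      (PySem.Dict.ofList [("master_resume", ""), ("email_text", ""), ("goals_preferences", "")])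
    = PySem.Dict.mk [("master_resume", PySem.Str.strip (PySem.Str.slice text (some (pr + PySem.Str.len ar)) (some (PySem.Str.len text)))), ("email_text", PySem.Str.strip (PySem.Str.slice text (some (pe + PySem.Str.len ae)) (some (pr)))), ("goals_preferences", "")] := rfl

lemma pvA_eg (text : String) (pe : Int) (ae : String) (pg : Int) (ag : String) :
    (PySem.List.enumerate [(pe, "email", ae), (pg, "goals", ag)]).foldl (a_assign text [(pe, "email", ae), (pg, "goals", ag)])
      (PySem.Dict.ofList [("master_resume", ""), ("email_text", ""), ("goals_preferences", "")])
    = PySem.Dict.mk [("master_resume", ""), ("email_text", PySem.Str.strip (PySem.Str.slice text (some (pe + PySem.Str.len ae)) (some (pg)))), ("goals_preferences", PySem.Str.strip (PySem.Str.slice text (some (pg + PySem.Str.len ag)) (some (PySem.Str.len text))))] := rfl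

lemma pvA_ge (text : String) (pg : Int) (ag : String) (pe : Int) (ae : String) :
    (PySem.List.enumerate [(pg, "goals", ag), (pe, "email", ae)]).foldl (a_assign text [(pg, "goals", ag), (pe, "email", ae)])
      (PySem.Dict.ofList [("master_resume", ""), ("email_text", ""), ("goals_preferences", "")])
    = PySem.Dict.mk [("master_resume", ""), ("email_text", PySem.Str.strip (PySem.Str.slice text (some (pe + PySem.Str.len ae)) (some (PySem.Str.len text)))), ("goals_preferences", PySem.Str.strip (PySem.Str.slice text (some (pg + PySem.Str.len ag)) (some (pe))))] := rfl

lemma pvA_ger (text : String) (pg : Int) (ag : String) (pe : Int) (ae : String) (pr : Int) (ar : String) :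
    (PySem.List.enumerate [(pg, "goals", ag), (pe, "email", ae), (pr, "resume", ar)]).foldl (a_assign text [(pg, "goals", ag), (pe, "email", ae), (pr, "resume", ar)])
      (PySem.Dict.ofList [("master_resume", ""), ("email_text", ""), ("goals_preferences", "")])
    = PySem.Dict.mk [("master_resume", PySem.Str.strip (PySem.Str.slice text (some (pr + PySem.Str.len ar)) (some (PySem.Str.len text)))), ("email_text", PySem.Str.strip (PySem.Str.slice text (some (pe + PySem.Str.len ae)) (some (pr)))), ("goals_preferences", PySem.Str.strip (PySem.Str.slice text (some (pg + PySem.Str.len ag)) (some (pe))))] := rfl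

lemma pvA_egr (text : String) (pe : Int) (ae : String) (pg : Int) (ag : String) (pr : Int) (ar : String) :
    (PySem.List.enumerate [(pe, "email", ae), (pg, "goals", ag), (pr, "resume", ar)]).foldl (a_assign text [(pe, "email", ae), (pg, "goals", ag), (pr, "resume", ar)])
      (PySem.Dict.ofList [("master_resume", ""), ("email_text", ""), ("goals_preferences", "")])
    = PySem.Dict.mk [("master_resume", PySem.Str.strip (PySem.Str.slice text (some (pr + PySem.Str.len ar)) (some (PySem.Str.len text)))), ("email_text", PySem.Str.strip (PySem.Str.slice text (some (pe + PySem.Str.len ae)) (some (pg)))), ("goals_preferences", PySem.Str.strip (PySem.Str.slice text (some (pg + PySem.Str.len ag)) (some (pr))))] := rfl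

lemma pvA_erg (text : String) (pe : Int) (ae : String) (pr : Int) (ar : String) (pg : Int) (ag : String) :
    (PySem.List.enumerate [(pe, "email", ae), (pr, "resume", ar), (pg, "goals", ag)]).foldl (a_assign text [(pe, "email", ae), (pr, "resume", ar), (pg, "goals", ag)])
      (PySem.Dict.ofList [("master_resume", ""), ("email_text", ""), ("goals_preferences", "")])
    = PySem.Dict.mk [("master_resume", PySem.Str.strip (PySem.Str.slice text (some (pr + PySem.Str.len ar)) (some (pg)))), ("email_text", PySem.Str.strip (PySem.Str.slice text (some (pe + PySem.Str.len ae)) (some (pr)))), ("goals_preferences", PySem.Str.strip (PySem.Str.slice text (some (pg + PySem.Str.len ag)) (some (PySem.Str.len text))))] := rfl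

lemma pvA_gre (text : String) (pg : Int) (ag : String) (pr : Int) (ar : String) (pe : Int) (ae : String) :
    (PySem.List.enumerate [(pg, "goals", ag), (pr, "resume", ar), (pe, "email", ae)]).foldl (a_assign text [(pg, "goals", ag), (pr, "resume", ar), (pe, "email", ae)])
      (PySem.Dict.ofList [("master_resume", ""), ("email_text", ""), ("goals_preferences", "")])
    = PySem.Dict.mk [("master_resume", PySem.Str.strip (PySem.Str.slice text (some (pr + PySem.Str.len ar)) (some (pe)))), ("email_text", PySem.Str.strip (PySem.Str.slice text (some (pe + PySem.Str.len ae)) (some (PySem.Str.len text)))), ("goals_preferences", PySem.Str.strip (PySem.Str.slice text (some (pg + PySem.Str.len ag)) (some (pr))))] := rfl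

lemma pvA_rge (text : String) (pr : Int) (ar : String) (pg : Int) (ag : String) (pe : Int) (ae : String) :
    (PySem.List.enumerate [(pr, "resume", ar), (pg, "goals", ag), (pe, "email", ae)]).foldl (a_assign text [(pr, "resume", ar), (pg, "goals", ag), (pe, "email", ae)])
      (PySem.Dict.ofList [("master_resume", ""), ("email_text", ""), ("goals_preferences", "")])
    = PySem.Dict.mk [("master_resume", PySem.Str.strip (PySem.Str.slice text (some (pr + PySem.Str.len ar)) (some (pg)))), ("email_text", PySem.Str.strip (PySem.Str.slice text (some (pe + PySem.Str.len ae)) (some (PySem.Str.len text)))), ("goals_preferences", PySem.Str.strip (PySem.Str.slice text (some (pg + PySem.Str.len ag)) (some (pe))))] := rfl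

lemma pvA_reg (text : String) (pr : Int) (ar : String) (pe : Int) (ae : String) (pg : Int) (ag : String) :
    (PySem.List.enumerate [(pr, "resume", ar), (pe, "email", ae), (pg, "goals", ag)]).foldl (a_assign text [(pr, "resume", ar), (pe, "email", ae), (pg, "goals", ag)])
      (PySem.Dict.ofList [("master_resume", ""), ("email_text", ""), ("goals_preferences", "")])
    = PySem.Dict.mk [("master_resume", PySem.Str.strip (PySem.Str.slice text (some (pr + PySem.Str.len ar)) (some (pe)))), ("email_text", PySem.Str.strip (PySem.Str.slice text (some (pe + PySem.Str.len ae)) (some (pg)))), ("goals_preferences", PySem.Str.strip (PySem.Str.slice text (some (pg + PySem.Str.len ag)) (some (PySem.Str.len text))))] := rfl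

-- B-side assembly-loop evaluations (one per present-section pattern)
lemma pvB_r (text : String) (i1 : Int) (a1 : String) :
    ([("master_resume", (i1, a1))] : List (String × Int × String)).foldl
      (fun d kv => d.insert kv.1 (PySem.Str.strip (PySem.Str.slice text (some (kv.2.1 + PySem.Str.len kv.2.2))
        (some (b_end text (([("master_resume", (i1, a1))] : List (String × Int × String)).map (fun x => x.2.1)) kv.2.1)))))
      (PySem.Dict.ofList [("master_resume", ""), ("email_text", ""), ("goals_preferences", "")])
    = PySem.Dict.mk [("master_resume", PySem.Str.strip (PySem.Str.slice text (some (i1 + PySem.Str.len a1)) (some (b_end text [i1] i1)))), ("email_text", ""), ("goals_preferences", "")] := rfl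

lemma pvB_e (text : String) (i2 : Int) (a2 : String) :
    ([("email_text", (i2, a2))] : List (String × Int × String)).foldl
      (fun d kv => d.insert kv.1 (PySem.Str.strip (PySem.Str.slice text (some (kv.2.1 + PySem.Str.len kv.2.2))
        (some (b_end text (([("email_text", (i2, a2))] : List (String × Int × String)).map (fun x => x.2.1)) kv.2.1)))))
      (PySem.Dict.ofList [("master_resume", ""), ("email_text", ""), ("goals_preferences", "")])
    = PySem.Dict.mk [("master_resume", ""), ("email_text", PySem.Str.strip (PySem.Str.slice text (some (i2 + PySem.Str.len a2)) (some (b_end text [i2] i2)))), ("goals_preferences", "")] := rfl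

lemma pvB_g (text : String) (i3 : Int) (a3 : String) :
    ([("goals_preferences", (i3, a3))] : List (String × Int × String)).foldl
      (fun d kv => d.insert kv.1 (PySem.Str.strip (PySem.Str.slice text (some (kv.2.1 + PySem.Str.len kv.2.2))
        (some (b_end text (([("goals_preferences", (i3, a3))] : List (String × Int × String)).map (fun x => x.2.1)) kv.2.1)))))
      (PySem.Dict.ofList [("master_resume", ""), ("email_text", ""), ("goals_preferences", "")])
    = PySem.Dict.mk [("master_resume", ""), ("email_text", ""), ("goals_preferences", PySem.Str.strip (PySem.Str.slice text (some (i3 + PySem.Str.len a3)) (some (b_end text [i3] i3))))] := rfl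

lemma pvB_re (text : String) (i1 : Int) (a1 : String) (i2 : Int) (a2 : String) :
    ([("master_resume", (i1, a1)), ("email_text", (i2, a2))] : List (String × Int × String)).foldl
      (fun d kv => d.insert kv.1 (PySem.Str.strip (PySem.Str.slice text (some (kv.2.1 + PySem.Str.len kv.2.2))
        (some (b_end text (([("master_resume", (i1, a1)), ("email_text", (i2, a2))] : List (String × Int × String)).map (fun x => x.2.1)) kv.2.1)))))
      (PySem.Dict.ofList [("master_resume", ""), ("email_text", ""), ("goals_preferences", "")])
    = PySem.Dict.mk [("master_resume", PySem.Str.strip (PySem.Str.slice text (some (i1 + PySem.Str.len a1)) (some (b_end text [i1, i2] i1)))), ("email_text", PySem.Str.strip (PySem.Str.slice text (some (i2 + PySem.Str.len a2)) (some (b_end text [i1, i2] i2)))), ("goals_preferences", "")] := rfl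

lemma pvB_rg (text : String) (i1 : Int) (a1 : String) (i3 : Int) (a3 : String) :
    ([("master_resume", (i1, a1)), ("goals_preferences", (i3, a3))] : List (String × Int × String)).foldl
      (fun d kv => d.insert kv.1 (PySem.Str.strip (PySem.Str.slice text (some (kv.2.1 + PySem.Str.len kv.2.2))
        (some (b_end text (([("master_resume", (i1, a1)), ("goals_preferences", (i3, a3))] : List (String × Int × String)).map (fun x => x.2.1)) kv.2.1)))))
      (PySem.Dict.ofList [("master_resume", ""), ("email_text", ""), ("goals_preferences", "")])
    = PySem.Dict.mk [("master_resume", PySem.Str.strip (PySem.Str.slice text (some (i1 + PySem.Str.len a1)) (some (b_end text [i1, i3] i1)))), ("email_text", ""), ("goals_preferences", PySem.Str.strip (PySem.Str.slice text (some (i3 + PySem.Str.len a3)) (some (b_end text [i1, i3] i3))))] := rfl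

lemma pvB_eg (text : String) (i2 : Int) (a2 : String) (i3 : Int) (a3 : String) :
    ([("email_text", (i2, a2)), ("goals_preferences", (i3, a3))] : List (String × Int × String)).foldl
      (fun d kv => d.insert kv.1 (PySem.Str.strip (PySem.Str.slice text (some (kv.2.1 + PySem.Str.len kv.2.2))
        (some (b_end text (([("email_text", (i2, a2)), ("goals_preferences", (i3, a3))] : List (String × Int × String)).map (fun x => x.2.1)) kv.2.1)))))
      (PySem.Dict.ofList [("master_resume", ""), ("email_text", ""), ("goals_preferences", "")])
    = PySem.Dict.mk [("master_resume", ""), ("email_text", PySem.Str.strip (PySem.Str.slice text (some (i2 + PySem.Str.len a2)) (some (b_end text [i2, i3] i2)))), ("goals_preferences", PySem.Str.strip (PySem.Str.slice text (some (i3 + PySem.Str.len a3)) (some (b_end text [i2, i3] i3))))] := rfl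

lemma pvB_reg (text : String) (i1 : Int) (a1 : String) (i2 : Int) (a2 : String) (i3 : Int) (a3 : String) :
    ([("master_resume", (i1, a1)), ("email_text", (i2, a2)), ("goals_preferences", (i3, a3))] : List (String × Int × String)).foldl
      (fun d kv => d.insert kv.1 (PySem.Str.strip (PySem.Str.slice text (some (kv.2.1 + PySem.Str.len kv.2.2))
        (some (b_end text (([("master_resume", (i1, a1)), ("email_text", (i2, a2)), ("goals_preferences", (i3, a3))] : List (String × Int × String)).map (fun x => x.2.1)) kv.2.1)))))
      (PySem.Dict.ofList [("master_resume", ""), ("email_text", ""), ("goals_preferences", "")])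
    = PySem.Dict.mk [("master_resume", PySem.Str.strip (PySem.Str.slice text (some (i1 + PySem.Str.len a1)) (some (b_end text [i1, i2, i3] i1)))), ("email_text", PySem.Str.strip (PySem.Str.slice text (some (i2 + PySem.Str.len a2)) (some (b_end text [i1, i2, i3] i2)))), ("goals_preferences", PySem.Str.strip (PySem.Str.slice text (some (i3 + PySem.Str.len a3)) (some (b_end text [i1, i2, i3] i3))))] := rfl

set_option maxHeartbeats 2000000 in
lemma pv_main_eq (text : String) : parse_jobmatch_sections text = parse_jobmatch_sections_alt text := by
  unfold parse_jobmatch_sections parse_jobmatch_sections_alt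
  by_cases hg : (PySem.Str.len text == 0 || PySem.Str.len (PySem.Str.strip text) == 0) = true
  · rw [if_pos hg, if_pos hg]
  · rw [if_neg hg, if_neg hg]
    dsimp only [aSections, bTable, b_hits, List.foldl_cons, List.foldl_nil]
    rw [find_first_eq _ _ (by decide), find_first_eq _ _ (by decide), find_first_eq _ _ (by decide)]
    rcases hh1 : b_first_heading (PySem.Str.lower text)
        ["here is my master resume/profile:", "master resume/profile:", "master resume:", "resume:"]
      with _ | ⟨i1, a1⟩ <;>
    rcases hh2 : b_first_heading (PySem.Str.lower text)
        ["here is the email to analyze:", "email to analyze:", "job alert email:", "email:"]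
      with _ | ⟨i2, a2⟩ <;>
    rcases hh3 : b_first_heading (PySem.Str.lower text)
        ["my goals and preferences:", "goals and preferences:", "preferences:"]
      with _ | ⟨i3, a3⟩
    · rfl
    · -- goals only
      dsimp only
      simp only [List.nil_append, List.singleton_append, List.cons_append]
      have hs : PySem.List.sorted [(i3, "goals", a3)] (fun t => t.1) false = [(i3, "goals", a3)] := by
        simp only [PySem.List.sorted_eq_foldl_insertBy, List.foldl_cons, List.foldl_nil,
          PySem.List.insertBy, decide_true, decide_false,
          Bool.false_eq_true, if_true, if_false, List.nil_append, List.cons_append]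
      rw [hs, pvA_g text i3 a3]
      rw [show (((PySem.Dict.mk ([] : List (String × Int × String))).insert "goals_preferences" (i3, a3))).items = [("goals_preferences", (i3, a3))] from rfl]
      rw [pvB_g text i3 a3]
      rw [pv_bend_len text [i3] i3 (by intro p hp; simp at hp; omega)]
      rfl
    · -- email only
      dsimp only
      simp only [List.nil_append, List.singleton_append, List.cons_append]
      have hs : PySem.List.sorted [(i2, "email", a2)] (fun t => t.1) false = [(i2, "email", a2)] := by
        simp only [PySem.List.sorted_eq_foldl_insertBy, List.foldl_cons, List.foldl_nil,
          PySem.List.insertBy, decide_true, decide_false,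
          Bool.false_eq_true, if_true, if_false, List.nil_append, List.cons_append]
      rw [hs, pvA_e text i2 a2]
      rw [show (((PySem.Dict.mk ([] : List (String × Int × String))).insert "email_text" (i2, a2))).items = [("email_text", (i2, a2))] from rfl]
      rw [pvB_e text i2 a2]
      rw [pv_bend_len text [i2] i2 (by intro p hp; simp at hp; omega)]
      rfl
    · -- email and goals
      have hne23 : i2 ≠ i3 := pv_hits_ne _ _ _ _ _ _ _ hh2 hh3 pv_disj_eg
      dsimp only
      simp only [List.nil_append, List.singleton_append, List.cons_append]
      rw [show ((((PySem.Dict.mk ([] : List (String × Int × String))).insert "email_text" (i2, a2)).insert "goals_preferences" (i3, a3))).items = [("email_text", (i2, a2)), ("goals_preferences", (i3, a3))] from rfl]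
      rw [pvB_eg text i2 a2 i3 a3]
      by_cases hA : i3 < i2
      · have hs : PySem.List.sorted [(i2, "email", a2), (i3, "goals", a3)] (fun t => t.1) false = [(i3, "goals", a3), (i2, "email", a2)] := by
          simp only [PySem.List.sorted_eq_foldl_insertBy, List.foldl_cons, List.foldl_nil,
            PySem.List.insertBy, hA, decide_true, decide_false,
            Bool.false_eq_true, if_true, if_false, List.nil_append, List.cons_append]
        rw [hs, pvA_ge text i3 a3 i2 a2]
        rw [pv_bend_len text [i2, i3] i2 (by intro p hp; simp at hp; rcases hp with rfl | rfl <;> omega)]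
        rw [pv_bend_eq text [i2, i3] i3 i2 (by simp) (by omega) (by intro p hp hpp; simp at hp; rcases hp with rfl | rfl <;> omega)]
        rfl
      · have hs : PySem.List.sorted [(i2, "email", a2), (i3, "goals", a3)] (fun t => t.1) false = [(i2, "email", a2), (i3, "goals", a3)] := by
          simp only [PySem.List.sorted_eq_foldl_insertBy, List.foldl_cons, List.foldl_nil,
            PySem.List.insertBy, hA, decide_true, decide_false,
            Bool.false_eq_true, if_true, if_false, List.nil_append, List.cons_append]
        rw [hs, pvA_eg text i2 a2 i3 a3]
        rw [pv_bend_eq text [i2, i3] i2 i3 (by simp) (by omega) (by intro p hp hpp; simp at hp; rcases hp with rfl | rfl <;> omega)]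
        rw [pv_bend_len text [i2, i3] i3 (by intro p hp; simp at hp; rcases hp with rfl | rfl <;> omega)]
        rfl
    · -- resume only
      dsimp only
      simp only [List.nil_append, List.singleton_append, List.cons_append]
      have hs : PySem.List.sorted [(i1, "resume", a1)] (fun t => t.1) false = [(i1, "resume", a1)] := by
        simp only [PySem.List.sorted_eq_foldl_insertBy, List.foldl_cons, List.foldl_nil,
          PySem.List.insertBy, decide_true, decide_false,
          Bool.false_eq_true, if_true, if_false, List.nil_append, List.cons_append]
      rw [hs, pvA_r text i1 a1]
      rw [show (((PySem.Dict.mk ([] : List (String × Int × String))).insert "master_resume" (i1, a1))).items = [("master_resume", (i1, a1))] from rfl]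
      rw [pvB_r text i1 a1]
      rw [pv_bend_len text [i1] i1 (by intro p hp; simp at hp; omega)]
      rfl
    · -- resume and goals
      have hne13 : i1 ≠ i3 := pv_hits_ne _ _ _ _ _ _ _ hh1 hh3 pv_disj_rg
      dsimp only
      simp only [List.nil_append, List.singleton_append, List.cons_append]
      rw [show ((((PySem.Dict.mk ([] : List (String × Int × String))).insert "master_resume" (i1, a1)).insert "goals_preferences" (i3, a3))).items = [("master_resume", (i1, a1)), ("goals_preferences", (i3, a3))] from rfl]
      rw [pvB_rg text i1 a1 i3 a3]
      by_cases hA : i3 < i1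
      · have hs : PySem.List.sorted [(i1, "resume", a1), (i3, "goals", a3)] (fun t => t.1) false = [(i3, "goals", a3), (i1, "resume", a1)] := by
          simp only [PySem.List.sorted_eq_foldl_insertBy, List.foldl_cons, List.foldl_nil,
            PySem.List.insertBy, hA, decide_true, decide_false,
            Bool.false_eq_true, if_true, if_false, List.nil_append, List.cons_append]
        rw [hs, pvA_gr text i3 a3 i1 a1]
        rw [pv_bend_len text [i1, i3] i1 (by intro p hp; simp at hp; rcases hp with rfl | rfl <;> omega)]
        rw [pv_bend_eq text [i1, i3] i3 i1 (by simp) (by omega) (by intro p hp hpp; simp at hp; rcases hp with rfl | rfl <;> omega)]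
        rfl
      · have hs : PySem.List.sorted [(i1, "resume", a1), (i3, "goals", a3)] (fun t => t.1) false = [(i1, "resume", a1), (i3, "goals", a3)] := by
          simp only [PySem.List.sorted_eq_foldl_insertBy, List.foldl_cons, List.foldl_nil,
            PySem.List.insertBy, hA, decide_true, decide_false,
            Bool.false_eq_true, if_true, if_false, List.nil_append, List.cons_append]
        rw [hs, pvA_rg text i1 a1 i3 a3]
        rw [pv_bend_eq text [i1, i3] i1 i3 (by simp) (by omega) (by intro p hp hpp; simp at hp; rcases hp with rfl | rfl <;> omega)]
        rw [pv_bend_len text [i1, i3] i3 (by intro p hp; simp at hp; rcases hp with rfl | rfl <;> omega)]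
        rfl
    · -- resume and email
      have hne12 : i1 ≠ i2 := pv_hits_ne _ _ _ _ _ _ _ hh1 hh2 pv_disj_re
      dsimp only
      simp only [List.nil_append, List.singleton_append, List.cons_append]
      rw [show ((((PySem.Dict.mk ([] : List (String × Int × String))).insert "master_resume" (i1, a1)).insert "email_text" (i2, a2))).items = [("master_resume", (i1, a1)), ("email_text", (i2, a2))] from rfl]
      rw [pvB_re text i1 a1 i2 a2]
      by_cases hA : i2 < i1
      · have hs : PySem.List.sorted [(i1, "resume", a1), (i2, "email", a2)] (fun t => t.1) false = [(i2, "email", a2), (i1, "resume", a1)] := by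
          simp only [PySem.List.sorted_eq_foldl_insertBy, List.foldl_cons, List.foldl_nil,
            PySem.List.insertBy, hA, decide_true, decide_false,
            Bool.false_eq_true, if_true, if_false, List.nil_append, List.cons_append]
        rw [hs, pvA_er text i2 a2 i1 a1]
        rw [pv_bend_len text [i1, i2] i1 (by intro p hp; simp at hp; rcases hp with rfl | rfl <;> omega)]
        rw [pv_bend_eq text [i1, i2] i2 i1 (by simp) (by omega) (by intro p hp hpp; simp at hp; rcases hp with rfl | rfl <;> omega)]
        rfl
      · have hs : PySem.List.sorted [(i1, "resume", a1), (i2, "email", a2)] (fun t => t.1) false = [(i1, "resume", a1), (i2, "email", a2)] := by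
          simp only [PySem.List.sorted_eq_foldl_insertBy, List.foldl_cons, List.foldl_nil,
            PySem.List.insertBy, hA, decide_true, decide_false,
            Bool.false_eq_true, if_true, if_false, List.nil_append, List.cons_append]
        rw [hs, pvA_re text i1 a1 i2 a2]
        rw [pv_bend_eq text [i1, i2] i1 i2 (by simp) (by omega) (by intro p hp hpp; simp at hp; rcases hp with rfl | rfl <;> omega)]
        rw [pv_bend_len text [i1, i2] i2 (by intro p hp; simp at hp; rcases hp with rfl | rfl <;> omega)]
        rfl
    · -- all three
      have hne12 : i1 ≠ i2 := pv_hits_ne _ _ _ _ _ _ _ hh1 hh2 pv_disj_re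
      have hne13 : i1 ≠ i3 := pv_hits_ne _ _ _ _ _ _ _ hh1 hh3 pv_disj_rg
      have hne23 : i2 ≠ i3 := pv_hits_ne _ _ _ _ _ _ _ hh2 hh3 pv_disj_eg
      dsimp only
      simp only [List.nil_append, List.singleton_append, List.cons_append]
      rw [show (((((PySem.Dict.mk ([] : List (String × Int × String))).insert "master_resume" (i1, a1)).insert "email_text" (i2, a2)).insert "goals_preferences" (i3, a3))).items = [("master_resume", (i1, a1)), ("email_text", (i2, a2)), ("goals_preferences", (i3, a3))] from rfl]
      rw [pvB_reg text i1 a1 i2 a2 i3 a3]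
      by_cases hA : i2 < i1
      · by_cases hB : i3 < i2
        · have hs : PySem.List.sorted [(i1, "resume", a1), (i2, "email", a2), (i3, "goals", a3)] (fun t => t.1) false = [(i3, "goals", a3), (i2, "email", a2), (i1, "resume", a1)] := by
            simp only [PySem.List.sorted_eq_foldl_insertBy, List.foldl_cons, List.foldl_nil,
              PySem.List.insertBy, hA, hB, decide_true, decide_false,
              Bool.false_eq_true, if_true, if_false, List.nil_append, List.cons_append]
          rw [hs, pvA_ger text i3 a3 i2 a2 i1 a1]
          rw [pv_bend_len text [i1, i2, i3] i1 (by intro p hp; simp at hp; rcases hp with rfl | rfl | rfl <;> omega)]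
          rw [pv_bend_eq text [i1, i2, i3] i2 i1 (by simp) (by omega) (by intro p hp hpp; simp at hp; rcases hp with rfl | rfl | rfl <;> omega)]
          rw [pv_bend_eq text [i1, i2, i3] i3 i2 (by simp) (by omega) (by intro p hp hpp; simp at hp; rcases hp with rfl | rfl | rfl <;> omega)]
          rfl
        · by_cases hC : i3 < i1
          · have hs : PySem.List.sorted [(i1, "resume", a1), (i2, "email", a2), (i3, "goals", a3)] (fun t => t.1) false = [(i2, "email", a2), (i3, "goals", a3), (i1, "resume", a1)] := by
              simp only [PySem.List.sorted_eq_foldl_insertBy, List.foldl_cons, List.foldl_nil,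
                PySem.List.insertBy, hA, hB, hC, decide_true, decide_false,
                Bool.false_eq_true, if_true, if_false, List.nil_append, List.cons_append]
            rw [hs, pvA_egr text i2 a2 i3 a3 i1 a1]
            rw [pv_bend_len text [i1, i2, i3] i1 (by intro p hp; simp at hp; rcases hp with rfl | rfl | rfl <;> omega)]
            rw [pv_bend_eq text [i1, i2, i3] i2 i3 (by simp) (by omega) (by intro p hp hpp; simp at hp; rcases hp with rfl | rfl | rfl <;> omega)]
            rw [pv_bend_eq text [i1, i2, i3] i3 i1 (by simp) (by omega) (by intro p hp hpp; simp at hp; rcases hp with rfl | rfl | rfl <;> omega)]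
            rfl
          · have hs : PySem.List.sorted [(i1, "resume", a1), (i2, "email", a2), (i3, "goals", a3)] (fun t => t.1) false = [(i2, "email", a2), (i1, "resume", a1), (i3, "goals", a3)] := by
              simp only [PySem.List.sorted_eq_foldl_insertBy, List.foldl_cons, List.foldl_nil,
                PySem.List.insertBy, hA, hB, hC, decide_true, decide_false,
                Bool.false_eq_true, if_true, if_false, List.nil_append, List.cons_append]
            rw [hs, pvA_erg text i2 a2 i1 a1 i3 a3]
            rw [pv_bend_eq text [i1, i2, i3] i1 i3 (by simp) (by omega) (by intro p hp hpp; simp at hp; rcases hp with rfl | rfl | rfl <;> omega)]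
            rw [pv_bend_eq text [i1, i2, i3] i2 i1 (by simp) (by omega) (by intro p hp hpp; simp at hp; rcases hp with rfl | rfl | rfl <;> omega)]
            rw [pv_bend_len text [i1, i2, i3] i3 (by intro p hp; simp at hp; rcases hp with rfl | rfl | rfl <;> omega)]
            rfl
      · by_cases hB : i3 < i1
        · have hs : PySem.List.sorted [(i1, "resume", a1), (i2, "email", a2), (i3, "goals", a3)] (fun t => t.1) false = [(i3, "goals", a3), (i1, "resume", a1), (i2, "email", a2)] := by
            simp only [PySem.List.sorted_eq_foldl_insertBy, List.foldl_cons, List.foldl_nil,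
              PySem.List.insertBy, hA, hB, decide_true, decide_false,
              Bool.false_eq_true, if_true, if_false, List.nil_append, List.cons_append]
          rw [hs, pvA_gre text i3 a3 i1 a1 i2 a2]
          rw [pv_bend_eq text [i1, i2, i3] i1 i2 (by simp) (by omega) (by intro p hp hpp; simp at hp; rcases hp with rfl | rfl | rfl <;> omega)]
          rw [pv_bend_len text [i1, i2, i3] i2 (by intro p hp; simp at hp; rcases hp with rfl | rfl | rfl <;> omega)]
          rw [pv_bend_eq text [i1, i2, i3] i3 i1 (by simp) (by omega) (by intro p hp hpp; simp at hp; rcases hp with rfl | rfl | rfl <;> omega)]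
          rfl
        · by_cases hC : i3 < i2
          · have hs : PySem.List.sorted [(i1, "resume", a1), (i2, "email", a2), (i3, "goals", a3)] (fun t => t.1) false = [(i1, "resume", a1), (i3, "goals", a3), (i2, "email", a2)] := by
              simp only [PySem.List.sorted_eq_foldl_insertBy, List.foldl_cons, List.foldl_nil,
                PySem.List.insertBy, hA, hB, hC, decide_true, decide_false,
                Bool.false_eq_true, if_true, if_false, List.nil_append, List.cons_append]
            rw [hs, pvA_rge text i1 a1 i3 a3 i2 a2]
            rw [pv_bend_eq text [i1, i2, i3] i1 i3 (by simp) (by omega) (by intro p hp hpp; simp at hp; rcases hp with rfl | rfl | rfl <;> omega)]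
            rw [pv_bend_len text [i1, i2, i3] i2 (by intro p hp; simp at hp; rcases hp with rfl | rfl | rfl <;> omega)]
            rw [pv_bend_eq text [i1, i2, i3] i3 i2 (by simp) (by omega) (by intro p hp hpp; simp at hp; rcases hp with rfl | rfl | rfl <;> omega)]
            rfl
          · have hs : PySem.List.sorted [(i1, "resume", a1), (i2, "email", a2), (i3, "goals", a3)] (fun t => t.1) false = [(i1, "resume", a1), (i2, "email", a2), (i3, "goals", a3)] := by
              simp only [PySem.List.sorted_eq_foldl_insertBy, List.foldl_cons, List.foldl_nil,
                PySem.List.insertBy, hA, hB, hC, decide_true, decide_false,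
                Bool.false_eq_true, if_true, if_false, List.nil_append, List.cons_append]
            rw [hs, pvA_reg text i1 a1 i2 a2 i3 a3]
            rw [pv_bend_eq text [i1, i2, i3] i1 i2 (by simp) (by omega) (by intro p hp hpp; simp at hp; rcases hp with rfl | rfl | rfl <;> omega)]
            rw [pv_bend_eq text [i1, i2, i3] i2 i3 (by simp) (by omega) (by intro p hp hpp; simp at hp; rcases hp with rfl | rfl | rfl <;> omega)]
            rw [pv_bend_len text [i1, i2, i3] i3 (by intro p hp; simp at hp; rcases hp with rfl | rfl | rfl <;> omega)]
            rfl

-- ===== VERDICT (by name: the statement is the Claim_ definition above) =====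
theorem parse_jobmatch_sections_spec : Claim_equal_parse_jobmatch_sections := by
  unfold Claim_equal_parse_jobmatch_sections Spec_parse_jobmatch_sections
  exact fun text _ => pv_main_eq text
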